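-- pv_equiv track=rewrite | github.com/kevin00000000/geeksforgeeks-oj | easy/101_pattern_count.py | _pattern_101
-- ===== SOURCE A (Python) =====
-- def _pattern_101(s):
--     result = 0
--     first_1_index = -1
--     has_zero = False
--     length = len(s)
--     for index in range(0, length):
--         if s[index] == '1':
--             if first_1_index == -1:
--                 first_1_index = index
--             else:
--                 if has_zero:
--                     first_1_index = index
--                     has_zero = False
--                     result += 1
--                 else:
--                     first_1_index = index
--         elif s[index] == '0':
--             if first_1_index != -1:
--                 has_zero = True
--         else:
--             first_1_index = -1
--             has_zero = False
--     return result
-- ===== SOURCE B (Python) =====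
-- def _pattern_101(s):
--     result = 0
--     n = len(s)
--     i = 0
--     while i < n:
--         if s[i] == '0':
--             start = i
--             while i < n and s[i] == '0':
--                 i += 1
--             if start > 0 and s[start - 1] == '1' and i < n and s[i] == '1':
--                 result += 1
--         else:
--             i += 1
--     return result
-- ===== Notes on version B (the rewrite author's own statement) =====
-- stated objective: alternative
-- what changed: Replaces the per-character three-variable state machine with a zero-run scanner: an outer loop consumes each maximal run of zero characters at once and counts the run when a one character flanks it on both sides.
import Mathlib
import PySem

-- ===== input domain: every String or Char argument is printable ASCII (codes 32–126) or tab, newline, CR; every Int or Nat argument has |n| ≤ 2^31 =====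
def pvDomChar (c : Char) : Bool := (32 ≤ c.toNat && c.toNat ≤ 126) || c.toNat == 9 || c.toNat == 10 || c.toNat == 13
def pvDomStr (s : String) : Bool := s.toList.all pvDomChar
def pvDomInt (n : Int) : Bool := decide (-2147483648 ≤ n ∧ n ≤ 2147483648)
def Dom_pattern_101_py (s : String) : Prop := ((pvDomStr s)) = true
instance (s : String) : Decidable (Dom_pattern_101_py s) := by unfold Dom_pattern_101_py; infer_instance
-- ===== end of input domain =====

-- B replaces A's per-character three-variable state machine by a scanner over maximal
-- runs of '0's, counting each run flanked by '1' on both sides (alternative decomposition).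

-- ===== PORT A =====
-- A's for-loop over indices, transliterated as a recursion over the characters
-- carrying the running index and the loop state (result, first_1_index, has_zero).
def pattern101AGo (idx result first1 : Int) (hz : Bool) : List Char → Int
  | [] => result
  | c :: cs =>
    if c = '1' then
      if first1 = -1 then pattern101AGo (idx + 1) result idx hz cs
      else
        if hz then pattern101AGo (idx + 1) (result + 1) idx false cs
        else pattern101AGo (idx + 1) result idx hz cs
    else if c = '0' then
      if first1 ≠ -1 then pattern101AGo (idx + 1) result first1 true cs
      else pattern101AGo (idx + 1) result first1 hz cs
    else pattern101AGo (idx + 1) result (-1) false cs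

def pattern_101_py (s : String) : Int :=
  pattern101AGo 0 0 (-1) false s.toList

-- ===== PORT B =====
-- B's while-loop: on a '0' the inner loop consumes the maximal zero run (dropWhile),
-- counting it when the previous character (carried as `prev`) and the next one are '1'.
def pattern101BGo (prev : Option Char) (l : List Char) : Int :=
  match l with
  | [] => 0
  | c :: cs =>
    if c = '0' then
      let rest := cs.dropWhile (fun d => d = '0')
      (if prev = some '1' && rest.head? = some '1' then 1 else 0) + pattern101BGo (some '0') rest
    else pattern101BGo (some c) cs
termination_by l.length
decreasing_by
  · exact Nat.lt_succ_of_le (by simpa using List.length_dropWhile_le (fun d => decide (d = '0')) cs)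
  · simp

def pattern_101_py_alt (s : String) : Int :=
  pattern101BGo none s.toList

-- ===== PRECONDITION & SPEC =====
def Spec_pattern_101_py (s : String) (out : Int) : Prop := out = pattern_101_py_alt s
instance (s : String) (out : Int) : Decidable (Spec_pattern_101_py s out) := by unfold Spec_pattern_101_py; infer_instance

-- ===== CLAIM (what is proved, stated in full; the proofs are below) =====
def Claim_equal_pattern_101_py : Prop := ∀ (s : String), Dom_pattern_101_py s → Spec_pattern_101_py s (pattern_101_py s)

-- ===== LEMMAS AND PROOFS =====

-- Abstract three-state machine underlying A (first_1_index only matters as "-1 or not").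
inductive P101St | non | one | onezero
deriving DecidableEq, Repr

def P101C : P101St → List Char → Int
  | _, [] => 0
  | st, c :: cs =>
    if c = '1' then (if st = .onezero then 1 else 0) + P101C .one cs
    else if c = '0' then P101C (if st = .non then .non else .onezero) cs
    else P101C .non cs

def P101mk (f : Int) (hz : Bool) : P101St :=
  if f = -1 then .non else if hz then .onezero else .one

lemma pattern101BGo_nil (prev : Option Char) : pattern101BGo prev [] = 0 := by
  rw [pattern101BGo]

lemma pattern101BGo_cons (prev : Option Char) (c : Char) (cs : List Char) :
    pattern101BGo prev (c :: cs) =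
      if c = '0' then
        (if prev = some '1' && (cs.dropWhile (fun d => d = '0')).head? = some '1' then 1 else 0)
          + pattern101BGo (some '0') (cs.dropWhile (fun d => d = '0'))
      else pattern101BGo (some c) cs := by
  rw [pattern101BGo]

-- A's recursion computes result + the abstract machine's count.
lemma pattern101A_abs : ∀ (l : List Char) (idx r f : Int) (hz : Bool),
    0 ≤ idx → (f = -1 → hz = false) →
    pattern101AGo idx r f hz l = r + P101C (P101mk f hz) l := by
  intro l
  induction l with
  | nil => intro idx r f hz _ _; simp [pattern101AGo, P101C]
  | cons c cs ih =>
    intro idx r f hz hidx hinv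
    have hidx' : ¬ (idx : Int) = -1 := by omega
    by_cases h1 : c = '1'
    · by_cases hf : f = -1
      · have hz0 : hz = false := hinv hf
        subst hz0
        simp only [pattern101AGo, h1, if_pos rfl, hf]
        rw [ih (idx + 1) r idx false (by omega) (by intro h; omega)]
        simp [P101C, P101mk, hf, h1, hidx']
      · by_cases hhz : hz = true
        · subst hhz
          simp only [pattern101AGo, h1, if_pos rfl, if_neg hf]
          rw [ih (idx + 1) (r + 1) idx false (by omega) (by intro h; omega)]
          simp [P101C, P101mk, hf, h1, hidx']
          omega
        · have hz0 : hz = false := by simpa using hhz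
          subst hz0
          simp only [pattern101AGo, h1, if_pos rfl, if_neg hf]
          rw [ih (idx + 1) r idx false (by omega) (by intro h; omega)]
          simp [P101C, P101mk, hf, h1, hidx']
    · by_cases h0 : c = '0'
      · by_cases hf : f = -1
        · have hz0 : hz = false := hinv hf
          subst hz0
          simp only [pattern101AGo, if_neg h1, h0, if_pos rfl, hf, ne_eq, not_true_eq_false,
            if_false]
          rw [ih (idx + 1) r (-1) false (by omega) (fun _ => rfl)]
          simp [P101C, P101mk, h1, h0]
        · simp only [pattern101AGo, if_neg h1, h0, if_pos rfl, ne_eq, hf, not_false_eq_true,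
            if_true]
          rw [ih (idx + 1) r f true (by omega) (by intro h; exact absurd h hf)]
          simp only [P101C, P101mk, if_neg h1, h0, if_pos rfl, if_neg hf, if_pos rfl]
          cases hz <;> simp
      · simp only [pattern101AGo, if_neg h1, if_neg h0]
        rw [ih (idx + 1) r (-1) false (by omega) (fun _ => rfl)]
        simp [P101C, P101mk, h1, h0]

-- The abstract machine in state .non ignores a prefix of zeros.
lemma P101C_non_dropWhile : ∀ (l : List Char),
    P101C .non l = P101C .non (l.dropWhile (fun d => d = '0')) := by
  intro l
  induction l with
  | nil => simp
  | cons c cs ih =>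
    by_cases h0 : c = '0'
    · have h1 : ¬ c = '1' := by subst h0; decide
      simp [P101C, h0, h1, List.dropWhile, ih]
    · simp [List.dropWhile, h0]

-- The abstract machine in state .onezero over a zero run: one point if the run is
-- closed by '1', then continue from .non past the run.
lemma P101C_onezero : ∀ (cs : List Char),
    P101C .onezero cs =
      (if (cs.dropWhile (fun d => d = '0')).head? = some '1' then 1 else 0)
        + P101C .non (cs.dropWhile (fun d => d = '0')) := by
  intro cs
  induction cs with
  | nil => simp [P101C]
  | cons c cs ih =>
    by_cases h0 : c = '0'
    · have h1 : ¬ c = '1' := by subst h0; decide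
      simp only [List.dropWhile, h0, decide_true]
      rw [← ih]
      simp [P101C, h1, h0]
    · by_cases h1 : c = '1'
      · simp [List.dropWhile, h0, P101C, h1]
      · simp [List.dropWhile, h0, P101C, h1]


lemma P101C_non_cons0 (cs : List Char) : P101C .non ('0' :: cs) = P101C .non cs := by
  simp [P101C]

lemma P101C_one_cons0 (cs : List Char) : P101C .one ('0' :: cs) = P101C .onezero cs := by
  simp [P101C]

-- B's run scanner equals the abstract machine, jointly for both reachable entry states.
lemma pattern101B_abs : ∀ (n : Nat) (l : List Char), l.length ≤ n →
    (∀ prev : Option Char, prev ≠ some '1' → pattern101BGo prev l = P101C .non l) ∧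
    (pattern101BGo (some '1') l = P101C .one l) := by
  intro n
  induction n with
  | zero =>
    intro l hl
    have : l = [] := List.eq_nil_of_length_eq_zero (Nat.le_zero.mp hl)
    subst this
    exact ⟨fun prev _ => by simp [pattern101BGo_nil, P101C],
           by simp [pattern101BGo_nil, P101C]⟩
  | succ n ih =>
    intro l hl
    cases l with
    | nil =>
      exact ⟨fun prev _ => by simp [pattern101BGo_nil, P101C],
             by simp [pattern101BGo_nil, P101C]⟩
    | cons c cs =>
      have hcs : cs.length ≤ n := by simpa using Nat.lt_succ_iff.mp (by simpa using hl)
      have hrest : (cs.dropWhile (fun d => d = '0')).length ≤ n :=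
        le_trans (by simpa using List.length_dropWhile_le (fun d => decide (d = '0')) cs) hcs
      constructor
      · intro prev hprev
        by_cases h0 : c = '0'
        · subst h0
          rw [pattern101BGo_cons, if_pos rfl]
          rw [(ih _ hrest).1 (some '0') (by decide)]
          have hnp : (prev = some '1' && (cs.dropWhile (fun d => d = '0')).head? = some '1') = false := by
            cases hp : decide (prev = some '1') with
            | true => exact absurd (of_decide_eq_true hp) hprev
            | false => simp [of_decide_eq_false hp]
          rw [hnp, P101C_non_cons0, P101C_non_dropWhile cs]
          simp
        · by_cases h1 : c = '1'
          · rw [pattern101BGo_cons, if_neg h0, h1, (ih _ hcs).2]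
            simp [P101C, h1]
          · rw [pattern101BGo_cons, if_neg h0,
              (ih _ hcs).1 (some c) (by simpa using h1)]
            simp [P101C, h1, h0]
      · by_cases h0 : c = '0'
        · subst h0
          rw [pattern101BGo_cons, if_pos rfl]
          rw [(ih _ hrest).1 (some '0') (by decide)]
          rw [P101C_one_cons0, P101C_onezero cs]
          simp
        · by_cases h1 : c = '1'
          · rw [pattern101BGo_cons, if_neg h0, h1, (ih _ hcs).2]
            simp [P101C, h1]
          · rw [pattern101BGo_cons, if_neg h0,
              (ih _ hcs).1 (some c) (by simpa using h1)]
            simp [P101C, h1, h0]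

-- ===== VERDICT (by name: the statement is the Claim_ definition above) =====
theorem pattern_101_py_spec : Claim_equal_pattern_101_py := by
  intro s _
  unfold Spec_pattern_101_py pattern_101_py pattern_101_py_alt
  rw [pattern101A_abs s.toList 0 0 (-1) false (by norm_num) (fun _ => rfl)]
  rw [(pattern101B_abs s.toList.length s.toList le_rfl).1 none (by simp)]
  simp [P101mk]
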